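-- pv_equiv track=rewrite | github.com/tinaseifi/comp115 | lab6_tina.py | temp_category
-- ===== SOURCE A (Python) =====
-- def temp_category(temps):
--     hot_count = 0
--     mild_count = 0
--     cold_count = 0
--     for temp in temps :
--      if temp >= 30:
--         hot_count += 1
--      elif temp >= 15:
--         mild_count += 1
--      else:
--         cold_count += 1
--     return [hot_count, mild_count, cold_count]
-- ===== SOURCE B (Python) =====
-- def temp_category(temps):
--     temps = list(temps)
--     hot = sum(t >= 30 for t in temps)
--     cold = sum(t < 15 for t in temps)
--     return [hot, len(temps) - hot - cold, cold]
-- ===== Notes on version B (the rewrite author's own statement) =====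
-- stated objective: idiomatic
-- what changed: Replaces the single-pass three-counter if/elif/else loop with staged sum() passes that count hot and cold directly and derive the mild count by subtraction from the list length.
import Mathlib
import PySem

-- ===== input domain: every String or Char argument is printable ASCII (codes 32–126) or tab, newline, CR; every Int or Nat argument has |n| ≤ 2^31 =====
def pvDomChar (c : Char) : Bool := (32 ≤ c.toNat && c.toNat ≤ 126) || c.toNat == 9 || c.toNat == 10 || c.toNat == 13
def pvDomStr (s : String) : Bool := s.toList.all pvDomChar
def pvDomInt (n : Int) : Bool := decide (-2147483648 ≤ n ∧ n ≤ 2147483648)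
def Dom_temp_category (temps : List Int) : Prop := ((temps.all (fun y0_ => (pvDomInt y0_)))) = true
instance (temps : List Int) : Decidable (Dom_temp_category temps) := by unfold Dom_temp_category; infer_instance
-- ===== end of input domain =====

-- B replaces A's single-pass three-counter if/elif ladder with staged count passes
-- (hot and cold counted directly, mild derived by subtraction); idiomatic, same O(n).


-- ===== PORT A =====
def temp_category (temps : List Int) : List Int :=
  let s := temps.foldl (fun (s : Int × Int × Int) temp =>
    if temp ≥ 30 then (s.1 + 1, s.2.1, s.2.2)
    else if temp ≥ 15 then (s.1, s.2.1 + 1, s.2.2)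
    else (s.1, s.2.1, s.2.2 + 1)) (0, 0, 0)
  [s.1, s.2.1, s.2.2]

-- ===== PORT B =====
-- sum(bool for …) → countP; len → length; mild derived by subtraction, as in Source B
def temp_category_alt (temps : List Int) : List Int :=
  let hot : Int := temps.countP (fun t => t ≥ 30)
  let cold : Int := temps.countP (fun t => t < 15)
  [hot, (temps.length : Int) - hot - cold, cold]

-- ===== PRECONDITION & SPEC =====
def Spec_temp_category (temps : List Int) (out : List Int) : Prop := out = temp_category_alt temps
instance (temps : List Int) (out : List Int) : Decidable (Spec_temp_category temps out) := by unfold Spec_temp_category; infer_instance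

-- ===== CLAIM (what is proved, stated in full; the proofs are below) =====
def Claim_equal_temp_category : Prop := ∀ (temps : List Int), Dom_temp_category temps → Spec_temp_category temps (temp_category temps)

-- ===== LEMMAS AND PROOFS =====
theorem temp_category_fold_eq (ts : List Int) (h m c : Int) :
    ts.foldl (fun (s : Int × Int × Int) temp =>
      if temp ≥ 30 then (s.1 + 1, s.2.1, s.2.2)
      else if temp ≥ 15 then (s.1, s.2.1 + 1, s.2.2)
      else (s.1, s.2.1, s.2.2 + 1)) (h, m, c)
    = (h + ts.countP (fun t => t ≥ 30),
       m + (ts.countP (fun t => 15 ≤ t ∧ t < 30)),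
       c + ts.countP (fun t => t < 15)) := by
  induction ts generalizing h m c with
  | nil => simp
  | cons t ts ih =>
    simp only [List.foldl_cons, List.countP_cons]
    by_cases h30 : t ≥ 30
    · simp only [if_pos h30, ih]
      simp [h30, show ¬ t < 15 by omega, show ¬ (15 ≤ t ∧ t < 30) by omega]
      omega
    · by_cases h15 : t ≥ 15
      · simp only [if_neg h30, if_pos h15, ih]
        simp [show ¬ t ≥ 30 by omega, show ¬ t < 15 by omega,
          show (15 ≤ t ∧ t < 30) by omega]
        omega
      · simp only [if_neg h30, if_neg h15, ih]
        simp [show ¬ t ≥ 30 by omega, show t < 15 by omega,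
          show ¬ (15 ≤ t ∧ t < 30) by omega]
        omega

theorem countP_partition (ts : List Int) :
    (ts.countP (fun t => t ≥ 30) : Int)
      + ts.countP (fun t => 15 ≤ t ∧ t < 30)
      + ts.countP (fun t => t < 15) = ts.length := by
  induction ts with
  | nil => simp
  | cons t ts ih =>
    simp only [List.countP_cons, List.length_cons]
    by_cases h30 : t ≥ 30 <;> by_cases h15 : t ≥ 15 <;>
      simp_all <;> omega

-- ===== VERDICT (by name: the statement is the Claim_ definition above) =====
theorem temp_category_spec : Claim_equal_temp_category := by
  intro temps _
  show temp_category temps = temp_category_alt temps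
  simp only [temp_category, temp_category_alt, temp_category_fold_eq]
  have := countP_partition temps
  simp only [List.cons.injEq, and_true]
  refine ⟨by ring, by omega, by omega⟩
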